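-- pv_equiv track=rewrite | github.com/rithika-sr/Charlie | frontend/mbta_chatbot/chatbot.py | find_stop_mentions
-- ===== SOURCE A (Python) =====
-- def find_stop_mentions(msg_lower: str, id_to_name: dict):
--     """
--     Very simple matching: look for any stop name that appears as a substring
--     in the message. Return a list of (stop_id, stop_name) sorted by length desc.
--     """
--     matches = []
--     for sid, name in id_to_name.items():
--         nlow = name.lower()
--         if nlow in msg_lower:
--             matches.append((sid, name))
--     # longer names first to avoid 'Arlington' vs 'Arlington Center'
--     matches.sort(key=lambda x: len(x[1]), reverse=True)
--     return matches
-- ===== SOURCE B (Python) =====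
-- def find_stop_mentions(msg_lower: str, id_to_name: dict):
--     """
--     Bucket (counting) sort by name length: group the mentioned stops into
--     length buckets in one pass, then emit the buckets from longest length to
--     shortest.  No comparison sort of the matches is ever performed.
--     """
--     buckets = {}
--     for sid, name in id_to_name.items():
--         if name.lower() in msg_lower:
--             buckets.setdefault(len(name), []).append((sid, name))
--     out = []
--     for length in sorted(buckets, reverse=True):
--         out.extend(buckets[length])
--     return out
-- ===== Notes on version B (the rewrite author's own statement) =====
-- stated objective: alternative
-- what changed: Replaces A's comparison sort of the match list by a bucket (counting) sort: one pass groups the mentioned stops into a dict of length buckets (setdefault/append), then the buckets are concatenated from longest key to shortest; stability comes from appending in scan order, not from a stable sort.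
import Mathlib
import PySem

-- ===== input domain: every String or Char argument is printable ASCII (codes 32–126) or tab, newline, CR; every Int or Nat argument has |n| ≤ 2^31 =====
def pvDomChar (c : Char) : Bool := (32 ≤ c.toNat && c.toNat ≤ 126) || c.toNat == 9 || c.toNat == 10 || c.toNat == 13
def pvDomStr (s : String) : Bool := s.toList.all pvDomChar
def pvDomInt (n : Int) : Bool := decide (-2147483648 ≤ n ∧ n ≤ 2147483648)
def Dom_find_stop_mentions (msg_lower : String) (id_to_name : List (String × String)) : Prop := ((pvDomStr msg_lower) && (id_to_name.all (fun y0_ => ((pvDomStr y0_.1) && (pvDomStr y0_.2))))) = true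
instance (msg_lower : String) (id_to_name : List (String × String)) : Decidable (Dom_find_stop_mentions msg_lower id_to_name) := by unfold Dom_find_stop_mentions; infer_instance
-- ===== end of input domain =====

-- B replaces A's comparison sort of the match list by a bucket (counting) sort keyed on name
-- length: one grouping pass into length buckets, then the buckets are emitted longest-first.

-- ===== PORT A =====
def find_stop_mentions (msg_lower : String) (id_to_name : List (String × String)) : List (String × String) :=
  -- nlow = name.lower(); 'nlow in msg_lower' is PySem.Str.isIn; matches.sort(key=len, reverse=True)
  let ms := id_to_name.foldl (fun acc p =>
    if PySem.Str.isIn (PySem.Str.lower p.2) msg_lower then acc ++ [p] else acc) []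
  PySem.List.sorted ms (fun x => PySem.Str.len x.2) true

-- ===== PORT B =====
-- buckets.setdefault(len(name), []).append((sid, name)) = overwrite-in-place insert of the
-- extended bucket (Python's in-place append keeps the key's dict position, as Dict.insert does)
def find_stop_mentions_alt (msg_lower : String) (id_to_name : List (String × String)) : List (String × String) :=
  let buckets := id_to_name.foldl
    (fun (d : PySem.Dict Int (List (String × String))) q =>
      if PySem.Str.isIn (PySem.Str.lower q.2) msg_lower then
        d.insert (PySem.Str.len q.2) (d.getD (PySem.Str.len q.2) [] ++ [q])
      else d)
    (PySem.Dict.mk [])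
  (PySem.List.sorted buckets.keys (fun x => x) true).foldl
    (fun out length => out ++ buckets.getD length []) []

-- ===== PRECONDITION & SPEC =====
def Spec_find_stop_mentions (msg_lower : String) (id_to_name : List (String × String)) (out : List (String × String)) : Prop := out = find_stop_mentions_alt msg_lower id_to_name
instance (msg_lower : String) (id_to_name : List (String × String)) (out : List (String × String)) : Decidable (Spec_find_stop_mentions msg_lower id_to_name out) := by unfold Spec_find_stop_mentions; infer_instance

-- ===== CLAIM =====
def Claim_equal_find_stop_mentions : Prop := ∀ (msg_lower : String) (id_to_name : List (String × String)), Dom_find_stop_mentions msg_lower id_to_name → Spec_find_stop_mentions msg_lower id_to_name (find_stop_mentions msg_lower id_to_name)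

-- ===== LEMMAS AND PROOFS =====

-- stable desc insertion passes over a prefix whose keys are all ≥ the new key
theorem pvIns_skip {α : Type} (key : α → Int) (x : α) (u v : List α)
    (h : ∀ a ∈ u, ¬ key a < key x) :
    PySem.List.insertBy (fun a b => decide (key b < key a)) x (u ++ v) =
      u ++ PySem.List.insertBy (fun a b => decide (key b < key a)) x v := by
  induction u with
  | nil => rfl
  | cons q t ih =>
      simp only [List.cons_append, PySem.List.insertBy, decide_eq_true_eq,
        if_neg (h q (by simp))]
      rw [ih (fun a ha => h a (by simp [ha]))]

-- inserting x in front is right when every element already there has a strictly smaller key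
theorem pvIns_front {α : Type} (key : α → Int) (x : α) (v : List α)
    (h : ∀ b ∈ v, key b < key x) :
    PySem.List.insertBy (fun a b => decide (key b < key a)) x v = x :: v := by
  cases v with
  | nil => rfl
  | cons q t => simp [PySem.List.insertBy, h q (by simp)]

-- inserting x into a bucket decomposition appends it at the end of its own bucket
theorem pvIns_flatMap {α : Type} (key : α → Int) (x : α) (ds : List Int) (f : Int → List α)
    (hds : ds.Pairwise (· > ·)) (hx : key x ∈ ds) (hf : ∀ L, ∀ a ∈ f L, key a = L) :
    PySem.List.insertBy (fun a b => decide (key b < key a)) x (ds.flatMap f) =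
      ds.flatMap (fun L => f L ++ if key x = L then [x] else []) := by
  induction ds with
  | nil => cases hx
  | cons L rest ih =>
      rw [List.pairwise_cons] at hds
      rcases List.mem_cons.mp hx with hL | hrest
      · -- x belongs to the first bucket; its key is larger than every later bucket's
        have hrest_empty : rest.flatMap (fun L' => f L' ++ if key x = L' then [x] else [])
            = rest.flatMap f := by
          apply List.flatMap_congr
          intro L' hL'
          rw [if_neg (by have := hds.1 L' hL'; omega), List.append_nil]
        simp only [List.flatMap_cons, hrest_empty]
        rw [pvIns_skip key x (f L) (rest.flatMap f)
            (fun a ha => by rw [hf L a ha, hL]; omega),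
          pvIns_front key x (rest.flatMap f) (fun b hb => by
            rcases List.mem_flatMap.mp hb with ⟨L', hL', hb'⟩
            rw [hf L' b hb', hL]; exact hds.1 L' hL')]
        simp [hL]
      · -- x belongs to a later bucket: its key is below L, skip the whole first bucket
        have hlt : key x < L := hds.1 (key x) hrest
        simp only [List.flatMap_cons, if_neg (by omega : ¬ key x = L)]
        rw [List.append_nil, pvIns_skip key x (f L) (rest.flatMap f)
            (fun a ha => by rw [hf L a ha]; omega),
          ih hds.2 hrest]

-- the stable desc sort IS the bucket decomposition along any strictly-descending key cover
theorem pvSorted_eq_flatMap_filter {α : Type} (key : α → Int) (ms : List α) (ds : List Int)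
    (hds : ds.Pairwise (· > ·)) (hmem : ∀ a ∈ ms, key a ∈ ds) :
    PySem.List.sorted ms key true =
      ds.flatMap (fun L => ms.filter (fun a => decide (key a = L))) := by
  rw [PySem.List.sorted_rev_eq_foldl_insertBy]
  induction ms using List.reverseRecOn with
  | nil => simp
  | append_singleton xs x ih =>
      rw [List.foldl_append, List.foldl_cons, List.foldl_nil,
        ih (fun a ha => hmem a (by simp [ha])),
        pvIns_flatMap key x ds _ hds (hmem x (by simp))
          (fun L a ha => by simpa using (List.mem_filter.mp ha).2)]
      apply List.flatMap_congr
      intro L _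
      simp only [List.filter_append, List.filter_cons, List.filter_nil]
      by_cases h : key x = L <;> simp [h]

-- the grouping fold: each bucket collects, in order, the matches of that length
theorem pvBucket_getD {α : Type} (key : α → Int) (p : α → Bool) (xs : List α)
    (d : PySem.Dict Int (List α)) (L : Int) :
    (xs.foldl (fun (d : PySem.Dict Int (List α)) q =>
        if p q then d.insert (key q) (d.getD (key q) [] ++ [q]) else d) d).getD L [] =
      d.getD L [] ++ xs.filter (fun a => p a && decide (key a = L)) := by
  induction xs generalizing d with
  | nil => simp
  | cons x t ih =>
      rw [List.foldl_cons, ih, List.filter_cons]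
      by_cases hp : p x
      · by_cases hk : key x = L
        · simp [hp, hk]
        · simp [hp, hk, PySem.Dict.getD_insert, Ne.symm hk]
      · simp [hp]

-- contains agrees with key membership
theorem pvContains_iff {ν : Type} (d : PySem.Dict Int ν) (k : Int) :
    d.contains k = true ↔ k ∈ d.keys := by
  simp [PySem.Dict.contains, PySem.Dict.keys, List.any_eq_true]

-- overwriting an existing key leaves the key list unchanged
theorem pvKeys_insert_of_contains {ν : Type} (d : PySem.Dict Int ν) (k : Int) (v : ν)
    (hc : d.contains k = true) : (d.insert k v).keys = d.keys := by
  simp only [PySem.Dict.insert, hc, if_pos, PySem.Dict.keys, List.map_map]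
  apply List.map_congr_left
  intro q _
  by_cases hqk : q.1 = k <;> simp [Function.comp, hqk]

-- a fresh key goes to the end of the key list
theorem pvKeys_insert_of_not_contains {ν : Type} (d : PySem.Dict Int ν) (k : Int) (v : ν)
    (hc : ¬ d.contains k = true) : (d.insert k v).keys = d.keys ++ [k] := by
  simp [PySem.Dict.insert, hc, PySem.Dict.keys]

-- keys of an insert, as a set
theorem pvKeys_insert_mem {ν : Type} (d : PySem.Dict Int ν) (k k' : Int) (v : ν) :
    k' ∈ (d.insert k v).keys ↔ k' = k ∨ k' ∈ d.keys := by
  by_cases hc : d.contains k = true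
  · rw [pvKeys_insert_of_contains d k v hc]
    have hk : k ∈ d.keys := (pvContains_iff d k).mp hc
    constructor
    · exact Or.inr
    · rintro (rfl | h); exacts [hk, h]
  · rw [pvKeys_insert_of_not_contains d k v hc]
    simp [or_comm]

-- an insert never breaks distinctness of the keys
theorem pvKeys_insert_nodup {ν : Type} (d : PySem.Dict Int ν) (k : Int) (v : ν)
    (h : d.keys.Nodup) : (d.insert k v).keys.Nodup := by
  by_cases hc : d.contains k = true
  · rw [pvKeys_insert_of_contains d k v hc]; exact h
  · rw [pvKeys_insert_of_not_contains d k v hc]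
    have hk : k ∉ d.keys := fun hmem => hc ((pvContains_iff d k).mpr hmem)
    rw [List.nodup_append]
    refine ⟨h, by simp, ?_⟩
    intro a ha b hb
    rw [List.eq_of_mem_singleton hb]
    exact fun e => hk (e ▸ ha)

-- the grouping fold: key set and distinctness
theorem pvBucket_keys_mem {α : Type} (key : α → Int) (p : α → Bool) (xs : List α)
    (d : PySem.Dict Int (List α)) (L : Int) :
    L ∈ (xs.foldl (fun (d : PySem.Dict Int (List α)) q =>
        if p q then d.insert (key q) (d.getD (key q) [] ++ [q]) else d) d).keys ↔
      L ∈ d.keys ∨ ∃ a ∈ xs, p a ∧ key a = L := by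
  induction xs generalizing d with
  | nil => simp
  | cons x t ih =>
      rw [List.foldl_cons, ih]
      by_cases hp : p x
      · simp only [hp, if_pos, pvKeys_insert_mem]
        constructor
        · rintro (⟨rfl | h⟩ | ⟨a, ha, hpa, hk⟩)
          · exact Or.inr ⟨x, by simp, hp, rfl⟩
          · exact Or.inl h
          · exact Or.inr ⟨a, by simp [ha], hpa, hk⟩
        · rintro (h | ⟨a, ha, hpa, hk⟩)
          · exact Or.inl (Or.inr h)
          · rcases List.mem_cons.mp ha with rfl | ha
            · exact Or.inl (Or.inl hk.symm)
            · exact Or.inr ⟨a, ha, hpa, hk⟩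
      · simp only [hp, Bool.false_eq_true, if_neg, not_false_iff]
        constructor
        · rintro (h | ⟨a, ha, hpa, hk⟩)
          · exact Or.inl h
          · exact Or.inr ⟨a, by simp [ha], hpa, hk⟩
        · rintro (h | ⟨a, ha, hpa, hk⟩)
          · exact Or.inl h
          · rcases List.mem_cons.mp ha with rfl | ha
            · exact absurd hpa (by simp [hp])
            · exact Or.inr ⟨a, ha, hpa, hk⟩

theorem pvBucket_keys_nodup {α : Type} (key : α → Int) (p : α → Bool) (xs : List α)
    (d : PySem.Dict Int (List α)) (h : d.keys.Nodup) :
    (xs.foldl (fun (d : PySem.Dict Int (List α)) q =>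
        if p q then d.insert (key q) (d.getD (key q) [] ++ [q]) else d) d).keys.Nodup := by
  induction xs generalizing d with
  | nil => exact h
  | cons x t ih =>
      rw [List.foldl_cons]
      by_cases hp : p x
      · exact ih _ (by simpa [hp] using pvKeys_insert_nodup d (key x) _ h)
      · simpa [hp] using ih d h

theorem find_stop_mentions_spec : Claim_equal_find_stop_mentions := by
  intro msg_lower id_to_name _hdom
  show find_stop_mentions msg_lower id_to_name = find_stop_mentions_alt msg_lower id_to_name
  unfold find_stop_mentions find_stop_mentions_alt
  set p : String × String → Bool := fun q => PySem.Str.isIn (PySem.Str.lower q.2) msg_lower with hp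
  set key : String × String → Int := fun x => PySem.Str.len x.2 with hkey
  set d := id_to_name.foldl
    (fun (d : PySem.Dict Int (List (String × String))) q =>
      if p q then d.insert (key q) (d.getD (key q) [] ++ [q]) else d)
    (PySem.Dict.mk []) with hd
  set ds := PySem.List.sorted d.keys (fun x => x) true with hds
  have hA : (List.foldl (fun acc q => if p q then acc ++ [q] else acc)
      ([] : List (String × String)) id_to_name) = List.filter p id_to_name := by
    simpa using PySem.List.foldl_append_if_eq_filter p id_to_name []
  rw [hA]
  -- B's final loop is the flatMap of the buckets along ds
  rw [PySem.List.foldl_append_eq_flatMap (fun L => d.getD L []) ds []]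
  rw [List.nil_append]
  -- each bucket is the length-L slice of the matches
  have hbucket : ∀ L, d.getD L [] = (id_to_name.filter p).filter (fun a => decide (key a = L)) := by
    intro L
    rw [hd, pvBucket_getD key p id_to_name (PySem.Dict.mk []) L, List.filter_filter]
    simp [PySem.Dict.getD, PySem.Dict.get?, Bool.and_comm]
  -- ds is strictly descending
  have hnodup : ds.Nodup :=
    ((PySem.List.sorted_perm d.keys (fun x => x) true).symm).nodup
      (pvBucket_keys_nodup key p id_to_name (PySem.Dict.mk []) (by simp [PySem.Dict.keys]))
  have hdesc : ds.Pairwise (· > ·) := by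
    have h1 := PySem.List.sorted_pairwise_rev d.keys (fun x => x)
    rw [← hds] at h1
    exact (h1.and hnodup).imp (by rintro a b ⟨hle, hne⟩; omega)
  -- ds covers every match's key
  have hcov : ∀ a ∈ id_to_name.filter p, key a ∈ ds := by
    intro a ha
    rw [hds, PySem.List.mem_sorted,
      pvBucket_keys_mem key p id_to_name (PySem.Dict.mk []) (key a)]
    exact Or.inr ⟨a, List.mem_of_mem_filter ha, by simpa using (List.mem_filter.mp ha).2, rfl⟩
  rw [pvSorted_eq_flatMap_filter key (id_to_name.filter p) ds hdesc hcov]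
  exact (List.flatMap_congr (fun L _ => (hbucket L).symm))
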